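-- pv_equiv track=rewrite | github.com/Pass1k/basic-2 | Basic Collections Tuples/lesson2/task3.py | return_even_elements
-- ===== SOURCE A (Python) =====
-- def return_even_elements(date):
--     result = []
--     if isinstance(date, dict):
--         date = date.items()
--     for index, values in enumerate(date):
--         if index % 2 == 0:
--             result.append(values)
--     return  result
-- ===== SOURCE B (Python) =====
-- def return_even_elements(date):
--     if isinstance(date, dict):
--         date = date.items()
--     return list(date)[::2]
-- ===== Notes on version B (the rewrite author's own statement) =====
-- stated objective: simpler
-- what changed: Replaces the enumerate loop with its per-index parity test by materializing the iterable once and returning the stride-2 slice list(date)[::2].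
import Mathlib
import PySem

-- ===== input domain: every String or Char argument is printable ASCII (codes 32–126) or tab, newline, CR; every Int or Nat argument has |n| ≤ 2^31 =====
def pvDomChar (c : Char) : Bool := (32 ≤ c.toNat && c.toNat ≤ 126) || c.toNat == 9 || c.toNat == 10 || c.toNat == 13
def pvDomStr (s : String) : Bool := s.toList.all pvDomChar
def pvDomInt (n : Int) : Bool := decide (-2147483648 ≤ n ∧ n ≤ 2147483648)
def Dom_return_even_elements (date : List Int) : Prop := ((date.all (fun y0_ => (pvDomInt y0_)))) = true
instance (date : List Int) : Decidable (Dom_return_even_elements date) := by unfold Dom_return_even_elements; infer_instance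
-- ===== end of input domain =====

-- B replaces A's enumerate loop (index % 2 test per element) by the stride-2 slice list(date)[::2]; objective: simpler.


-- ===== PORT A =====
-- result = []; for index, values in enumerate(date): if index % 2 == 0: result.append(values); return result
-- (the isinstance(date, dict) branch cannot fire on a List Int argument)
def return_even_elements (date : List Int) : List Int :=
  (PySem.List.enumerate date 0).foldl
    (fun result iv => if PySem.Int.mod iv.1 2 == 0 then result ++ [iv.2] else result) []

-- ===== PORT B =====
-- return list(date)[::2]  (the isinstance(date, dict) branch cannot fire on a List Int argument)
def return_even_elements_alt (date : List Int) : List Int :=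
  (PySem.List.slice? date none none 2).getD []

-- ===== PRECONDITION & SPEC =====
def Spec_return_even_elements (date : List Int) (out : List Int) : Prop := out = return_even_elements_alt date
instance (date : List Int) (out : List Int) : Decidable (Spec_return_even_elements date out) := by unfold Spec_return_even_elements; infer_instance

-- ===== CLAIM (what is proved, stated in full; the proofs are below) =====
def Claim_equal_return_even_elements : Prop := ∀ (date : List Int), Dom_return_even_elements date → Spec_return_even_elements date (return_even_elements date)

-- ===== LEMMAS AND PROOFS =====

-- every-other-element, starting with the head when b = true
def evensB (b : Bool) : List Int → List Int
  | [] => []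
  | x :: t => if b then x :: evensB (!b) t else evensB (!b) t

theorem fold_enumerate_evensB : ∀ (xs : List Int) (s : Int) (acc : List Int),
    (PySem.List.enumerate xs s).foldl
      (fun result iv => if PySem.Int.mod iv.1 2 == 0 then result ++ [iv.2] else result) acc
      = acc ++ evensB (PySem.Int.mod s 2 == 0) xs
  | [], s, acc => by simp [PySem.List.enumerate, evensB]
  | x :: t, s, acc => by
    rw [PySem.List.enumerate_cons]
    simp only [List.foldl_cons]
    rw [fold_enumerate_evensB t (s + 1)]
    have hm : (PySem.Int.mod (s + 1) 2 == 0) = !(PySem.Int.mod s 2 == 0) := by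
      simp only [PySem.Int.mod, Int.fmod_eq_emod]
      by_cases h : s % 2 = 0
      · have h1 : (s + 1) % 2 = 1 := by omega
        simp [h, h1]
      · have h0 : s % 2 = 1 := by omega
        have h1 : (s + 1) % 2 = 0 := by omega
        simp [h0, h1]
    rw [hm]
    cases h : (PySem.Int.mod s 2 == 0) <;> simp [evensB]

theorem gather_evensB : ∀ (xs : List Int),
    (List.range ((xs.length + 1) / 2)).filterMap (fun k => xs[2 * k]?) = evensB true xs
  | [] => by decide
  | [x] => by simp [evensB]
  | x :: y :: t => by
    have hlen : ((x :: y :: t).length + 1) / 2 = (t.length + 1) / 2 + 1 := by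
      simp only [List.length_cons]; omega
    rw [hlen, List.range_succ_eq_map, List.filterMap_cons, List.filterMap_map]
    have hidx : (fun k => (x :: y :: t)[2 * Nat.succ k]?) = (fun k => t[2 * k]?) := by
      funext k
      have h2 : 2 * Nat.succ k = 2 * k + 1 + 1 := by omega
      rw [h2, List.getElem?_cons_succ, List.getElem?_cons_succ]
    simp only [Function.comp_def]
    rw [hidx, gather_evensB t]
    simp [evensB]

theorem slice?_two (xs : List Int) :
    PySem.List.slice? xs none none 2 = some (evensB true xs) := by
  simp only [PySem.List.slice?, PySem.List.sliceIndices]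
  norm_num
  have hc : (if 0 < xs.length then (((xs.length : Int) + 2 - 1) / 2).toNat else 0)
      = (xs.length + 1) / 2 := by split <;> omega
  rw [hc]
  simp only [show ∀ k : Nat, ((2 : Int) * (k : Int)).toNat = 2 * k from fun k => by omega]
  exact gather_evensB xs

theorem alt_eq_evensB (xs : List Int) : return_even_elements_alt xs = evensB true xs := by
  simp [return_even_elements_alt, slice?_two]

-- ===== VERDICT (by name: the statement is the Claim_ definition above) =====
theorem return_even_elements_spec : Claim_equal_return_even_elements := by
  intro date _
  unfold Spec_return_even_elements return_even_elements
  rw [alt_eq_evensB, fold_enumerate_evensB]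
  simp [PySem.Int.mod]
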